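-- pv_equiv track=rewrite | github.com/binnev/advent-of-code | python/puzzles/y2023/day12.py | get_possible_places
-- ===== SOURCE A (Python) =====
-- Match = tuple[int, int]  # the start/end indices of a substring within a string
--
-- def get_possible_places(s: str, number: int) -> list[Match]:
--     matches = []
--     for ii in range(len(s)):
--         substr = s[ii : ii + number]
--         if ii > 0:
--             prev_char = s[ii - 1]
--         else:
--             prev_char = "^"  # start of string
--
--         try:
--             next_char = s[ii + number]
--         except IndexError:
--             next_char = "$"  # end of string
--         if all(char in "?" for char in substr) and next_char != "#" and prev_char != "#":
--             matches.append((ii, ii + number))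
--     return matches
-- ===== SOURCE B (Python) =====
-- def get_possible_places(s: str, number: int) -> list:
--     n = len(s)
--     # prefix counts of characters that are not '?'
--     bad = [0] * (n + 1)
--     for i, c in enumerate(s):
--         bad[i + 1] = bad[i] + (c != "?")
--     matches = []
--     for ii in range(n):
--         end = ii + number
--         hi = min(end, n)
--         if (bad[hi] - bad[ii] == 0
--                 and (end >= n or s[end] != "#")
--                 and (ii == 0 or s[ii - 1] != "#")):
--             matches.append((ii, end))
--     return matches
-- ===== Notes on version B (the rewrite author's own statement) =====
-- stated objective: faster
-- what changed: B precomputes a prefix count of non-'?' characters in one pass so each start index is checked with an O(1) subtraction instead of rescanning the length-number window.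
-- outside the precondition, e.g. on get_possible_places('xx?x', -3): A returns [(2, -1), (3, 0)], B returns []
import Mathlib
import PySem

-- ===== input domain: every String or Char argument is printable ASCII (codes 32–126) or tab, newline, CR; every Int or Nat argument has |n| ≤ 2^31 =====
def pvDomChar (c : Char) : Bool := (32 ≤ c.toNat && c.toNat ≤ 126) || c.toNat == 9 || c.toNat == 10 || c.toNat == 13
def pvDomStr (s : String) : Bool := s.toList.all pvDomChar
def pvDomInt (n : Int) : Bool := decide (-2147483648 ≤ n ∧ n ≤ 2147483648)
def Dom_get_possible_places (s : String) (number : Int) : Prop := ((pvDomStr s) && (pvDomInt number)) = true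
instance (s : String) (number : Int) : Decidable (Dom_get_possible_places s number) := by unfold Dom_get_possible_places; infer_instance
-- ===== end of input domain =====

-- B replaces A's per-position rescan of the window with a prefix count of non-'?'
-- characters, giving an O(1) check per start index (objective: faster).

-- ===== PORT A =====
-- literal transliteration of A: for each ii, slice out the window and rescan it.
-- (s[ii-1] inside the loop always has 0 ≤ ii-1 < len(s), so the .getD default is never used.)
def get_possible_places (s : String) (number : Int) : List (Int × Int) :=
  let cs := s.toList
  (PySem.List.pyRange 0 (cs.length : Int) 1).foldl (fun ms ii =>
    let substr := PySem.List.slice cs (some ii) (some (ii + number))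
    let prev_char : Char := if ii > 0 then (PySem.List.pyGet? cs (ii - 1)).getD '^' else '^'
    let next_char : Char :=
      match PySem.List.pyGet? cs (ii + number) with
      | some c => c
      | none => '$'
    -- 'char in "?"' for a single character is 'char == ?'
    if substr.all (fun c => c == '?') && next_char != '#' && prev_char != '#' then
      ms ++ [(ii, ii + number)]
    else ms) []

-- ===== PORT B =====
-- transliteration of Source B: one pass builds the prefix counts 'bad' (running total t),
-- then each start index is checked in O(1).
def get_possible_places_alt (s : String) (number : Int) : List (Int × Int) :=
  let cs := s.toList
  let n : Int := (cs.length : Int)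
  let st := cs.foldl (fun (st : Int × List Int) c =>
      let t := st.1 + (if c != '?' then 1 else 0)
      (t, st.2 ++ [t])) ((0 : Int), ([0] : List Int))
  let bad := st.2
  (PySem.List.pyRange 0 n 1).foldl (fun ms ii =>
    let e := ii + number
    let hi := min e n
    if (PySem.List.pyGetD bad hi 0 - PySem.List.pyGetD bad ii 0 == 0)
        && (decide (e ≥ n) || PySem.List.pyGetD cs e ' ' != '#')
        && (ii == 0 || PySem.List.pyGetD cs (ii - 1) ' ' != '#') then
      ms ++ [(ii, e)]
    else ms) []

-- ===== PRECONDITION & SPEC =====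
-- Pre_ excludes negative `number` (a meaningless negative window length), where A's value
-- is an artefact of Python's negative-slice/negative-index wraparound; B's prefix-count
-- algorithm assumes a nonnegative window and raises or differs there.
def Pre_get_possible_places (s : String) (number : Int) : Prop := 0 ≤ number
instance (s : String) (number : Int) : Decidable (Pre_get_possible_places s number) := by unfold Pre_get_possible_places; infer_instance
def pvWitness_get_possible_places : String × Int := ("?#?", 2)

def Spec_get_possible_places (s : String) (number : Int) (out : List (Int × Int)) : Prop := out = get_possible_places_alt s number
instance (s : String) (number : Int) (out : List (Int × Int)) : Decidable (Spec_get_possible_places s number out) := by unfold Spec_get_possible_places; infer_instance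

-- ===== CLAIM (what is proved, stated in full; the proofs are below) =====
def Claim_equal_get_possible_places : Prop := ∀ (s : String) (number : Int), Dom_get_possible_places s number → Pre_get_possible_places s number → Spec_get_possible_places s number (get_possible_places s number)

-- ===== LEMMAS AND PROOFS =====

-- the prefix-count pass of B, characterised: total = count of non-'?', and the list is
-- the prefix counts of all prefixes.
theorem pv_badFold (cs : List Char) :
    cs.foldl (fun (st : Int × List Int) c =>
        let t := st.1 + (if c != '?' then 1 else 0)
        (t, st.2 ++ [t])) ((0 : Int), ([0] : List Int))
      = (((cs.countP (fun c => c != '?') : Nat) : Int),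
         (List.range (cs.length + 1)).map
           (fun k => (((cs.take k).countP (fun c => c != '?') : Nat) : Int))) := by
  induction cs using List.reverseRecOn with
  | nil => simp
  | append_singleton xs x ih =>
    simp only [List.foldl_append, List.foldl_cons, List.foldl_nil, ih]
    rw [Prod.mk.injEq]
    constructor
    · simp only [List.countP_append, List.countP_cons, List.countP_nil]
      by_cases hx : x = '?' <;> simp [hx, Int.add_comm]
    · rw [List.length_append, List.length_singleton]
      conv_rhs => rw [List.range_succ, List.map_append]
      congr 1
      · apply List.map_congr_left
        intro k hk
        rw [List.mem_range] at hk
        rw [List.take_append_of_le_length (by omega)]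
      · simp only [List.map_cons, List.map_nil,
          List.take_of_length_le (by simp : (xs ++ [x]).length ≤ xs.length + 1)]
        simp only [List.countP_append, List.countP_cons, List.countP_nil]
        by_cases hx : x = '?' <;> simp [hx, Int.add_comm]

-- value of B's prefix list at an in-range integer index
theorem pv_bad_getD (cs : List Char) (k : Int) (h0 : 0 ≤ k) (h1 : k ≤ (cs.length : Int)) :
    PySem.List.pyGetD ((List.range (cs.length + 1)).map
        (fun k => (((cs.take k).countP (fun c => c != '?') : Nat) : Int))) k 0
      = (((cs.take k.toNat).countP (fun c => c != '?') : Nat) : Int) := by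
  rw [PySem.List.pyGetD_eq_getElem _ _ h0 (by simp; omega)]
  rw [List.getElem_map, List.getElem_range]

-- the window is all-'?' iff the prefix counts at the window's ends agree
theorem pv_window_all (cs : List Char) (ii number : Int)
    (hii0 : 0 ≤ ii) (hiin : ii < (cs.length : Int)) (hnum : 0 ≤ number) :
    (PySem.List.slice cs (some ii) (some (ii + number))).all (fun c => c == '?')
      = decide ((((cs.take (min (ii + number) (cs.length : Int)).toNat).countP (fun c => c != '?') : Nat) : Int)
                - (((cs.take ii.toNat).countP (fun c => c != '?') : Nat) : Int) = 0) := by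
  rw [PySem.List.slice_toNat cs hii0 (by omega)]
  have hih : ii.toNat ≤ (min (ii + number) (cs.length : Int)).toNat := by omega
  have htake : cs.take (min (ii + number) (cs.length : Int)).toNat
      = cs.take ii.toNat ++ (cs.drop ii.toNat).take ((min (ii + number) (cs.length : Int)).toNat - ii.toNat) := by
    conv_lhs => rw [show (min (ii + number) (cs.length : Int)).toNat
      = ii.toNat + ((min (ii + number) (cs.length : Int)).toNat - ii.toNat) by omega]
    rw [List.take_add]
  have htt : (cs.drop ii.toNat).take ((ii + number).toNat - ii.toNat)
      = (cs.drop ii.toNat).take ((min (ii + number) (cs.length : Int)).toNat - ii.toNat) := by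
    rw [List.take_eq_take_iff]
    simp only [List.length_drop]
    omega
  rw [htake, htt, List.countP_append]
  by_cases hb : ((cs.drop ii.toNat).take ((min (ii + number) (cs.length : Int)).toNat - ii.toNat)).all (fun c => c == '?')
  · rw [hb]
    symm
    rw [decide_eq_true_iff]
    have h0 : ((cs.drop ii.toNat).take ((min (ii + number) (cs.length : Int)).toNat - ii.toNat)).countP (fun c => c != '?') = 0 := by
      rw [List.countP_eq_zero]
      intro x hx
      rw [List.all_eq_true] at hb
      have := hb x hx
      simp at this ⊢
      exact this
    rw [h0]
    push_cast
    ring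
  · rw [Bool.eq_false_iff.mpr hb]
    symm
    rw [decide_eq_false_iff_not]
    intro hc
    push_cast at hc
    have h0 : ((cs.drop ii.toNat).take ((min (ii + number) (cs.length : Int)).toNat - ii.toNat)).countP (fun c => c != '?') = 0 := by omega
    rw [List.countP_eq_zero] at h0
    apply hb
    rw [List.all_eq_true]
    intro x hx
    have := h0 x hx
    simp at this ⊢
    exact this

-- the 'next character' tests agree
theorem pv_next (cs : List Char) (e : Int) (he : 0 ≤ e) :
    ((match PySem.List.pyGet? cs e with | some c => c | none => '$') != '#')
      = (decide (e ≥ (cs.length : Int)) || PySem.List.pyGetD cs e ' ' != '#') := by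
  by_cases h : e < (cs.length : Int)
  · have hg : PySem.List.pyGet? cs e = some cs[e.toNat] := by
      simp only [PySem.List.pyGet?, PySem.List.pyIdx?, if_pos he, if_pos h]
      simp [List.getElem?_eq_getElem (show e.toNat < cs.length by omega)]
    rw [hg, PySem.List.pyGetD_eq_getElem cs ' ' he h]
    simp only [ge_iff_le]
    rw [decide_eq_false (by omega : ¬ ((cs.length : Int) ≤ e))]
    simp
  · have hg : PySem.List.pyGet? cs e = none := by
      simp only [PySem.List.pyGet?, PySem.List.pyIdx?, if_pos he, if_neg h]
      simp
    rw [hg]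
    simp only [ge_iff_le]
    rw [decide_eq_true (by omega : (cs.length : Int) ≤ e)]
    simp

-- the 'previous character' tests agree
theorem pv_prev (cs : List Char) (ii : Int) (h0 : 0 ≤ ii) (h1 : ii < (cs.length : Int)) :
    ((if ii > 0 then (PySem.List.pyGet? cs (ii - 1)).getD '^' else '^') != '#')
      = (ii == 0 || PySem.List.pyGetD cs (ii - 1) ' ' != '#') := by
  by_cases hz : ii = 0
  · subst hz; simp
  · have hpos : 0 < ii := by omega
    rw [if_pos hpos]
    have hget : PySem.List.pyGet? cs (ii - 1) = some cs[(ii - 1).toNat] := by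
      simp only [PySem.List.pyGet?, PySem.List.pyIdx?,
        if_pos (show (0:Int) ≤ ii - 1 by omega), if_pos (show ii - 1 < (cs.length : Int) by omega)]
      simp
    rw [hget, PySem.List.pyGetD_eq_getElem cs ' ' (by omega) (by omega)]
    have : (ii == 0) = false := by simp; omega
    rw [this]
    simp

-- ===== VERDICT (by name: the statement is the Claim_ definition above) =====
theorem get_possible_places_spec : Claim_equal_get_possible_places := by
  intro s number _hdom hpre
  unfold Spec_get_possible_places get_possible_places get_possible_places_alt
  simp only [pv_badFold]
  apply PySem.List.foldl_congr_mem
  intro acc ii hmem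
  rw [PySem.List.mem_pyRange_one] at hmem
  obtain ⟨h0, h1⟩ := hmem
  have hnum : 0 ≤ number := hpre
  rw [pv_window_all s.toList ii number h0 h1 hnum,
      pv_bad_getD s.toList (min (ii + number) (s.toList.length : Int)) (by omega) (by omega),
      pv_bad_getD s.toList ii (by omega) (by omega),
      pv_next s.toList (ii + number) (by omega),
      pv_prev s.toList ii h0 h1]
  rfl
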